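-- pv_equiv track=rewrite | github.com/xsjmonk/agent-long-term-memory | agent_embedding_builder/app/config_jsonc_preprocessor.py | _peek_next_significant
-- ===== SOURCE A (Python) =====
-- def _peek_next_significant(text: str, idx: int) -> str | None:
--     i = idx
--     while i < len(text):
--         ch = text[i]
--         nxt = text[i + 1] if i + 1 < len(text) else ""
--         if ch.isspace():
--             i += 1
--             continue
--         if ch == "/" and nxt == "/":
--             end = text.find("\n", i)
--             if end == -1:
--                 return None
--             i = end + 1
--             continue
--         if ch == "/" and nxt == "*":
--             end = text.find("*/", i + 2)
--             if end == -1: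
--                 return None
--             i = end + 2
--             continue
--         return ch
--     return None
-- ===== SOURCE B (Python) =====
-- def _peek_next_significant(text: str, idx: int) -> str | None:
--     # Single-pass five-state DFA over the suffix text[idx:]; no lookahead, no find().
--     state = "code"  # code | slash (just saw '/') | line | block | star (saw '*' in block)
--     for c in text[idx:]:
--         if state == "code":
--             if c == "/":
--                 state = "slash"
--             elif not c.isspace():
--                 return c
--         elif state == "slash":
--             if c == "/":
--                 state = "line"
--             elif c == "*":
--                 state = "block"
--             else:
--                 return "/"
--         elif state == "line":
--             if c == "\n":
--                 state = "code"
--         elif state == "block":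
--             if c == "*":
--                 state = "star"
--         else:  # star
--             if c == "/":
--                 state = "code"
--             elif c != "*":
--                 state = "block"
--     return "/" if state == "slash" else None
-- ===== Notes on version B (the rewrite author's own statement) =====
-- stated objective: alternative
-- what changed: Replaces A's index loop with lookahead and find()-based jumps over comments by a single-pass five-state DFA (code/slash/line-comment/block-comment/star) over the suffix text[idx:].
-- outside the precondition, e.g. on _peek_next_significant(' a ', -1): A returns 'a', B returns None; on _peek_next_significant('ab', -5): A raises IndexError, B returns 'a'
import Mathlib
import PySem

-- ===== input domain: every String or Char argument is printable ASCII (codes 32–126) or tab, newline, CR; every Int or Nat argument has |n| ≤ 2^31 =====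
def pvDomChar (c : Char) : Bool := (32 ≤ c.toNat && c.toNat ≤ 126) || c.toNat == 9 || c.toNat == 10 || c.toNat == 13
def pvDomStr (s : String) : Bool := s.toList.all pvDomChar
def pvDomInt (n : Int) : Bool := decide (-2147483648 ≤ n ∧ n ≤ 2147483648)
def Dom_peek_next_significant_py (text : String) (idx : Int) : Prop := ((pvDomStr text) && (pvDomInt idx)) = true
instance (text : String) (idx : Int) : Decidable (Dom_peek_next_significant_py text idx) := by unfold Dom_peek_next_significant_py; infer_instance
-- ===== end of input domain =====

-- B replaces A's index-and-find() scan by a single-pass five-state DFA over text[idx:] (alternative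
-- decomposition, same O(n) cost); equivalence is proved for 0 ≤ idx (Pre_), negative idx excluded.


-- ===== PORT A =====
-- `text.find(sub, i)` is PySem.Chars.findFrom; this fact is needed by the loop's termination proof.
theorem pvFindFromGe (l sub : List Char) (k : Nat) (hk : k ≤ l.length)
    (h : PySem.Chars.findFrom l sub (k : Int) none ≠ -1) :
    (k : Int) ≤ PySem.Chars.findFrom l sub (k : Int) none :=
  (PySem.Chars.findFrom_natCast_spec l sub k hk h).1

-- the while-loop of A: i the running index (Pre_ keeps it nonnegative)
def peekA (l : List Char) (i : Nat) : Option String :=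
  if h : i < l.length then
    let ch := l[i]
    let nxt : Option Char := l[i+1]?            -- text[i+1] if i+1 < len(text) else ""
    if PySem.Chars.isspace ch then peekA l (i+1)
    else if hsl : ch = '/' ∧ nxt = some '/' then -- line comment: jump past text.find("\n", i)
      let e := PySem.Chars.findFrom l ['\n'] (i : Int) none
      if he : e = -1 then none else peekA l (e.toNat + 1)
    else if hbl : ch = '/' ∧ nxt = some '*' then -- block comment: jump past text.find("*/", i+2)
      let e := PySem.Chars.findFrom l ['*','/'] ((i : Int) + 2) none
      if he : e = -1 then none else peekA l (e.toNat + 2)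
    else some (String.ofList [ch])
  else none
termination_by l.length - i
decreasing_by
  · omega
  · have hle := pvFindFromGe l ['\n'] i (by omega) he
    omega
  · have hi1 : i + 1 < l.length := (List.getElem?_eq_some_iff.mp hbl.2).1
    have he' : PySem.Chars.findFrom l ['*','/'] (((i + 2 : Nat) : Int)) none ≠ -1 := by
      push_cast; exact he
    have hle := pvFindFromGe l ['*','/'] (i + 2) (by omega) he'
    push_cast at hle
    omega

-- faithful for 0 ≤ idx (all of Pre_); negative idx is excluded by Pre_ (wraparound / IndexError in A)
def peek_next_significant_py (text : String) (idx : Int) : Option String :=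
  peekA text.toList idx.toNat

-- ===== PORT B =====
inductive PvState where
  | code | slash | line | block | star
deriving DecidableEq, Repr

-- the for-loop of Source B: one DFA step per character of text[idx:]
def peekB (st : PvState) (l : List Char) : Option String :=
  match l with
  | [] => if st = .slash then some "/" else none
  | c :: rest =>
    match st with
    | .code =>
      if c = '/' then peekB .slash rest
      else if ¬ PySem.Chars.isspace c then some (String.ofList [c])
      else peekB .code rest
    | .slash =>
      if c = '/' then peekB .line rest
      else if c = '*' then peekB .block rest
      else some "/"
    | .line => if c = '\n' then peekB .code rest else peekB .line rest
    | .block => if c = '*' then peekB .star rest else peekB .block rest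
    | .star =>
      if c = '/' then peekB .code rest
      else if c = '*' then peekB .star rest
      else peekB .block rest

def peek_next_significant_py_alt (text : String) (idx : Int) : Option String :=
  peekB .code (PySem.List.slice text.toList (some idx) none)   -- for c in text[idx:]

-- ===== PRECONDITION & SPEC =====
-- Pre_ excludes negative idx: for idx < -len(text) on nonempty text A raises IndexError, and for
-- -len(text) ≤ idx < 0 A's negative-index wraparound scans from the end and then rescans from 0,
-- an accident of Python indexing (A's callers pass nonnegative indices).
def Pre_peek_next_significant_py (text : String) (idx : Int) : Prop := 0 ≤ idx
instance (text : String) (idx : Int) : Decidable (Pre_peek_next_significant_py text idx) := by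
  unfold Pre_peek_next_significant_py; infer_instance

def pvWitness_peek_next_significant_py : String × Int := (" // c\nx", 0)

def Spec_peek_next_significant_py (text : String) (idx : Int) (out : Option String) : Prop :=
  out = peek_next_significant_py_alt text idx
instance (text : String) (idx : Int) (out : Option String) :
    Decidable (Spec_peek_next_significant_py text idx out) := by
  unfold Spec_peek_next_significant_py; infer_instance

-- ===== CLAIM (what is proved, stated in full; the proofs are below) =====
def Claim_equal_peek_next_significant_py : Prop :=
  ∀ (text : String) (idx : Int), Dom_peek_next_significant_py text idx →
    Pre_peek_next_significant_py text idx →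
    Spec_peek_next_significant_py text idx (peek_next_significant_py text idx)

-- ===== LEMMAS AND PROOFS =====

theorem prefix_one_cons (a b : Char) (t : List Char) : ([a] <+: b :: t) ↔ b = a := by
  constructor
  · intro h; rcases List.cons_prefix_cons.mp h with ⟨h1, -⟩; exact h1.symm
  · intro h; subst h; exact List.cons_prefix_cons.mpr ⟨rfl, List.nil_prefix⟩

theorem prefix_two_cons (a b c d : Char) (t : List Char) :
    ([a, b] <+: c :: d :: t) ↔ (c = a ∧ d = b) := by
  constructor
  · intro h
    rcases List.cons_prefix_cons.mp h with ⟨h1, h2⟩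
    rcases List.cons_prefix_cons.mp h2 with ⟨h3, -⟩
    exact ⟨h1.symm, h3.symm⟩
  · rintro ⟨rfl, rfl⟩
    exact List.cons_prefix_cons.mpr ⟨rfl, List.cons_prefix_cons.mpr ⟨rfl, List.nil_prefix⟩⟩

-- first index j with sub <+: l.drop j (proof-side mirror of str.find on a suffix)
def ff (sub : List Char) : List Char → Option Nat
  | [] => if sub <+: ([] : List Char) then some 0 else none
  | c :: t => if sub <+: (c :: t) then some 0 else (ff sub t).map (· + 1)

theorem ff_none (sub : List Char) : ∀ l, ff sub l = none → ∀ j, ¬ sub <+: l.drop j := by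
  intro l
  induction l with
  | nil =>
    intro h j; simp only [ff] at h
    split at h
    · cases h
    · rename_i hnp; simpa using hnp
  | cons c t ih =>
    intro h j
    simp only [ff] at h
    split at h
    · cases h
    · rename_i hnp
      match j with
      | 0 => simpa using hnp
      | j + 1 =>
        simp only [Option.map_eq_none_iff] at h
        exact ih h j

theorem ff_some (sub : List Char) : ∀ l j, ff sub l = some j →
    sub <+: l.drop j ∧ ∀ i < j, ¬ sub <+: l.drop i := by
  intro l
  induction l with
  | nil =>
    intro j h; simp only [ff] at h
    split at h
    · rename_i hp; cases h; exact ⟨hp, by omega⟩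
    · cases h
  | cons c t ih =>
    intro j h
    simp only [ff] at h
    split at h
    · rename_i hp; cases h; exact ⟨hp, by omega⟩
    · rename_i hnp
      rcases Option.map_eq_some_iff.mp h with ⟨j', hj', rfl⟩
      rcases ih j' hj' with ⟨h1, h2⟩
      refine ⟨by simpa using h1, ?_⟩
      intro i hi
      match i with
      | 0 => simpa using hnp
      | i + 1 => exact (by simpa using h2 i (by omega))

-- str.find from a nonnegative start, in terms of ff on the dropped suffix
theorem findFrom_eq_ff (l sub : List Char) (k : Nat) (hk : k ≤ l.length) :
    PySem.Chars.findFrom l sub (k : Int) none =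
      match ff sub (l.drop k) with
      | none => -1
      | some j => ((k + j : Nat) : Int) := by
  rcases hff : ff sub (l.drop k) with _ | j
  · simp only
    apply (PySem.Chars.findFrom_natCast_eq_neg_one_iff l sub k hk).mpr
    intro hinf
    have hin : PySem.Chars.isIn sub (l.drop k) = true :=
      (PySem.Chars.isIn_iff_infix sub (l.drop k)).mpr hinf
    rcases (PySem.Chars.exists_prefix_drop_iff_isIn sub (l.drop k)).mpr hin with ⟨j, hj⟩
    exact ff_none sub _ hff j hj
  · rcases ff_some sub _ j hff with ⟨hp, hmin⟩
    have hp' : sub <+: l.drop (k + j) := by rwa [List.drop_drop] at hp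
    have hne : PySem.Chars.findFrom l sub (k : Int) none ≠ -1 := by
      intro heq
      exact (PySem.Chars.findFrom_natCast_eq_neg_one_iff l sub k hk).mp heq
        (List.infix_iff_prefix_suffix.mpr ⟨(l.drop k).drop j, hp, List.drop_suffix j (l.drop k)⟩)
    rcases PySem.Chars.findFrom_natCast_spec l sub k hk hne with ⟨h1, h2, h3⟩
    set r := PySem.Chars.findFrom l sub (k : Int) none with hrdef
    have hr0 : (0 : Int) ≤ r := le_trans (by positivity) h1
    have hrk : k ≤ r.toNat := by omega
    have hub : ¬ (r.toNat < k + j) := by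
      intro hlt
      exact hmin (r.toNat - k) (by omega) (by
        rw [List.drop_drop]
        have hkk : k + (r.toNat - k) = r.toNat := by omega
        rw [hkk]; exact h2)
    have hlb : ¬ (k + j < r.toNat) := fun hlt => h3 (k + j) (by omega) hlt hp'
    have : r = ((k + j : Nat) : Int) := by omega
    simp only [this]

-- the DFA in line-comment state consumes up to and including the first '\n'
theorem peekB_line (l : List Char) :
    peekB .line l =
      match ff ['\n'] l with
      | none => none
      | some j => peekB .code (l.drop (j + 1)) := by
  induction l with
  | nil => simp [peekB, ff]
  | cons c t ih =>
    by_cases hc : c = '\n'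
    · subst hc
      simp [peekB, ff, prefix_one_cons]
    · have hpre : ¬ (['\n'] <+: c :: t) := by
        rw [prefix_one_cons]; exact hc
      simp only [peekB, if_neg hc, ff, if_neg hpre, ih]
      rcases ff ['\n'] t with _ | j <;> simp

-- the DFA in block-comment states consumes up to and including the first "*/"
theorem peekB_block_star (l : List Char) :
    (peekB .block l =
      match ff ['*','/'] l with
      | none => none
      | some j => peekB .code (l.drop (j + 2))) ∧
    (peekB .star l =
      match ff ['*','/'] ('*' :: l) with
      | none => none
      | some j => peekB .code (('*' :: l).drop (j + 2))) := by
  induction l with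
  | nil =>
    constructor
    · simp [peekB, ff]
    · simp [peekB, ff, List.cons_prefix_cons]
  | cons c t ih =>
    rcases ih with ⟨ihb, ihs⟩
    have hnp2 : ∀ (x : Char) (r : List Char), x ≠ '*' → ¬ (['*','/'] <+: x :: r) := by
      intro x r hx h
      rcases List.cons_prefix_cons.mp h with ⟨hx', -⟩
      exact hx hx'.symm
    constructor
    · -- block (c :: t)
      by_cases hc : c = '*'
      · subst hc
        simpa only [peekB, if_pos rfl] using ihs
      · have hnp := hnp2 c t hc
        simp only [peekB, if_neg hc, ff, if_neg hnp, ihb]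
        rcases ff ['*','/'] t with _ | j <;> simp
    · -- star (c :: t)
      by_cases hc : c = '/'
      · subst hc
        have hp : ['*','/'] <+: '*' :: '/' :: t := (prefix_two_cons _ _ _ _ t).mpr ⟨rfl, rfl⟩
        simp [peekB, ff, hp]
      · by_cases hc2 : c = '*'
        · subst hc2
          have hnp : ¬ (['*','/'] <+: '*' :: '*' :: t) := by
            rw [prefix_two_cons]; rintro ⟨-, h⟩; exact absurd h (by decide)
          simp only [peekB, if_neg (by decide : ¬ ('*' : Char) = '/'), if_pos rfl,
            ff, if_neg hnp, ihs]
          by_cases hq : ['/'] <+: t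
          · simp [hq]
          · rcases hr : ff ['*','/'] t with _ | j <;> simp [ff, hq, hr]
        · have hnp : ¬ (['*','/'] <+: '*' :: c :: t) := by
            rw [prefix_two_cons]; rintro ⟨-, h⟩; exact hc h
          have hnpc : ¬ (['*','/'] <+: c :: t) := hnp2 c t hc2
          simp only [peekB, if_neg hc, if_neg hc2, ff, if_neg hnp, if_neg hnpc, ihb]
          rcases ff ['*','/'] t with _ | j <;> simp

-- main loop invariant: A's scan from index i equals the DFA started in code state on the suffix
theorem peekA_eq_peekB (l : List Char) (i : Nat) :
    peekA l i = peekB .code (l.drop i) := by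
  induction hn : l.length - i using Nat.strong_induction_on generalizing i with
  | _ n ihn =>
  subst hn
  by_cases h : i < l.length
  · have hdrop : l.drop i = l[i] :: l.drop (i + 1) := List.drop_eq_getElem_cons h
    rw [peekA, dif_pos h]
    by_cases hsp : PySem.Chars.isspace l[i]
    · have hslash : ¬ (l[i] = '/') := by
        intro hq; rw [hq] at hsp; exact absurd hsp (by decide)
      rw [if_pos hsp, ihn (l.length - (i+1)) (by omega) (i+1) rfl, hdrop]
      simp [peekB, hslash, hsp]
    · by_cases hch : l[i] = '/'
      · rcases hnx : l[i+1]? with _ | c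
        · -- '/' is the last character: A returns "/", B ends in slash state
          rw [if_neg hsp, dif_neg (by rintro ⟨-, hq⟩; cases hq),
            dif_neg (by rintro ⟨-, hq⟩; cases hq)]
          have hnil : l.drop (i+1) = [] := by
            have := List.getElem?_eq_none_iff.mp hnx
            exact List.drop_eq_nil_of_le (by omega)
          have hB : peekB .code (l.drop i) = some "/" := by
            rw [hdrop, hnil]
            simp [peekB, hch]
          rw [hB, hch]
        · have hi1 : i + 1 < l.length := (List.getElem?_eq_some_iff.mp hnx).1
          have hdrop1 : l.drop (i+1) = c :: l.drop (i+2) := by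
            rw [List.drop_eq_getElem_cons hi1, (List.getElem?_eq_some_iff.mp hnx).2]
          by_cases hc1 : c = '/'
          · -- line comment
            subst hc1
            rw [if_neg hsp, dif_pos ⟨hch, rfl⟩]
            rw [findFrom_eq_ff l ['\n'] i (by omega)]
            have hn1 : ¬ (['\n'] <+: l[i] :: '/' :: l.drop (i+2)) := by
              rw [prefix_one_cons, hch]; decide
            have hn2 : ¬ (['\n'] <+: ('/' : Char) :: l.drop (i+2)) := by
              rw [prefix_one_cons]; decide
            have hff : ff ['\n'] (l.drop i) = (ff ['\n'] (l.drop (i+2))).map (· + 2) := by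
              rw [hdrop, hdrop1]
              simp only [ff, if_neg hn1, if_neg hn2]
              cases ff ['\n'] (l.drop (i+2)) with
              | none => simp
              | some j => simp
            have hB : peekB .code (l.drop i) = peekB .line (l.drop (i+2)) := by
              rw [hdrop, hdrop1]
              simp [peekB, hch]
            rw [hff, hB, peekB_line]
            cases hf : ff ['\n'] (l.drop (i+2)) with
            | none => simp
            | some j =>
              simp only [Option.map_some]
              rw [dif_neg (by omega : ¬ (((i + (j + 2) : Nat) : Int) = -1))]
              have htn : ((((i + (j + 2) : Nat)) : Int)).toNat = i + j + 2 := by omega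
              rw [htn, ihn (l.length - (i + j + 2 + 1)) (by omega) (i + j + 2 + 1) rfl,
                List.drop_drop]
              congr 2
              omega
          · by_cases hc2 : c = '*'
            · -- block comment
              subst hc2
              rw [if_neg hsp, dif_neg (by rintro ⟨-, hq⟩; exact absurd hq (by decide)),
                dif_pos ⟨hch, rfl⟩]
              rw [show (i : Int) + 2 = ((i + 2 : Nat) : Int) by push_cast; ring]
              rw [findFrom_eq_ff l ['*','/'] (i+2) (by omega)]
              have hB : peekB .code (l.drop i) = peekB .block (l.drop (i+2)) := by
                rw [hdrop, hdrop1]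
                simp [peekB, hch]
              rw [hB, (peekB_block_star (l.drop (i+2))).1]
              cases hf : ff ['*','/'] (l.drop (i+2)) with
              | none => simp
              | some j =>
                simp only
                rw [dif_neg (by omega : ¬ (((i + 2 + j : Nat) : Int) = -1))]
                have htn : (((i + 2 + j : Nat) : Int)).toNat = i + 2 + j := by omega
                rw [htn, ihn (l.length - (i + 2 + j + 2)) (by omega) (i + 2 + j + 2) rfl,
                  List.drop_drop]
                congr 2
            · -- '/' followed by an ordinary character: return "/"
              rw [if_neg hsp, dif_neg (by rintro ⟨-, hq⟩; exact hc1 (Option.some_inj.mp hq)),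
                dif_neg (by rintro ⟨-, hq⟩; exact hc2 (Option.some_inj.mp hq))]
              have hB : peekB .code (l.drop i) = some "/" := by
                rw [hdrop, hdrop1]
                simp [peekB, hch, hc1, hc2]
              rw [hB, hch]
      · -- significant character
        rw [if_neg hsp, dif_neg (by rintro ⟨hq, -⟩; exact hch hq),
          dif_neg (by rintro ⟨hq, -⟩; exact hch hq), hdrop]
        simp [peekB, hch, hsp]
  · rw [peekA, dif_neg h, List.drop_eq_nil_of_le (by omega)]
    simp [peekB]

-- ===== VERDICT (by name: the statement is the Claim_ definition above) =====
theorem peek_next_significant_py_spec : Claim_equal_peek_next_significant_py := by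
  intro text idx _ hpre
  unfold Pre_peek_next_significant_py at hpre
  unfold Spec_peek_next_significant_py peek_next_significant_py peek_next_significant_py_alt
  rw [peekA_eq_peekB, PySem.List.slice_from text.toList hpre]
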